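-- pv_equiv track=rewrite | github.com/sarthakmittal92/python3-ug-cs | src/python3ugcs/dsa/Algos.py | hackerlandRadioTransmitters
-- ===== SOURCE A (Python) =====
-- def hackerlandRadioTransmitters(x, k):
--     # input: cover street with lights of range k placing at positions in x
--     # paradigm: Two-Pointers
--     x.sort()
--     st = x[0]
--     en = x[0]
--     tx = 1
--     for house in x:
--         if house > en + k:
--             tx += 1
--             en = house
--             st = house
--         else:
--             if house <= st + k:
--                 en = house
--     return tx
-- ===== SOURCE B (Python) =====
-- def hackerlandRadioTransmitters(x, k):
--     # Index-jumping greedy: sort in place (same mutation as A), then per group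
--     # jump to the farthest house reachable from the group's first house, place
--     # the transmitter there, and skip everything it covers.
--     x.sort()
--     n = len(x)
--     count = 0
--     i = 0
--     while i < n:
--         count += 1
--         j = i
--         while j + 1 < n and x[j + 1] <= x[i] + k:
--             j += 1
--         i = j + 1
--         while i < n and x[i] <= x[j] + k:
--             i += 1
--     return count
-- ===== Notes on version B (the rewrite author's own statement) =====
-- stated objective: alternative
-- what changed: A makes one pass over every house maintaining a (group-start, transmitter, count) state triple; B is an index-jumping greedy: per group it jumps straight to the farthest house reachable from the group's first house and then skips everything that transmitter covers, so the state triple disappears.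
-- intended difference: For negative range k (a nonsensical but accepted input) A returns len(x)+1 because its seed state makes the first house open a second group on top of the initial count of 1; B returns len(x) (one transmitter per house), which is the intended greedy count since the answer can never exceed the number of houses. — e.g. on hackerlandRadioTransmitters([0], -1): A returns 2, B returns 1
import Mathlib
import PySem

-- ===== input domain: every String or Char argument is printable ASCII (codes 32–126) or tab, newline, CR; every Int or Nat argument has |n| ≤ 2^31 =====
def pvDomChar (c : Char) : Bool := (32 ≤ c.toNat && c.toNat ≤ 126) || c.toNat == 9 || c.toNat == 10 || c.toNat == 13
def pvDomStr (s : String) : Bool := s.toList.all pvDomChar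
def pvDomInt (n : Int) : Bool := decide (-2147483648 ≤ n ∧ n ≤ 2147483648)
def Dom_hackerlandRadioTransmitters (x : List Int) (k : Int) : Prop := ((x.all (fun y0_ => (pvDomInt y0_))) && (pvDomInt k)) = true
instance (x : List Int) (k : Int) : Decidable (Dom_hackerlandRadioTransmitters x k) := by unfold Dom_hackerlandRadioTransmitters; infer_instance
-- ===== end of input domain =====

-- B replaces A's one-pass (group-start, transmitter, count) state machine by an
-- index-jumping greedy (objective: alternative, same cost). Both Pythons sort the
-- argument in place; the equivalence proved here is about the return value.

-- ===== PORT A =====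
-- the for-loop over the sorted list with state (st, en, tx)
def loopA (k st en tx : Int) : List Int → Int
  | [] => tx
  | house :: rest =>
    if house > en + k then loopA k house house (tx + 1) rest
    else if house ≤ st + k then loopA k st house tx rest
    else loopA k st en tx rest

def hackerlandRadioTransmitters (x : List Int) (k : Int) : Int :=
  -- x.sort(); the sorted list is the x the loop then runs over
  match PySem.List.pyGet? (PySem.List.sorted x (fun y => y) false) 0 with
  | none => 0                                        -- x[0]: IndexError on []; excluded by Pre_
  | some x0 => loopA k x0 x0 1 (PySem.List.sorted x (fun y => y) false)

-- ===== PORT B =====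
-- `while j + 1 < n and x[j + 1] <= loc: j += 1`  (fuel only makes the loop total)
def jscanB (xs : List Int) (loc : Int) : Nat → Nat → Nat
  | 0, j => j
  | f + 1, j =>
    if j + 1 < xs.length then
      (if xs.getD (j + 1) 0 ≤ loc then jscanB xs loc f (j + 1) else j)
    else j

-- `while i < n and x[i] <= loc: i += 1`  (fuel only makes the loop total)
def iscanB (xs : List Int) (loc : Int) : Nat → Nat → Nat
  | 0, i => i
  | f + 1, i =>
    if i < xs.length then
      (if xs.getD i 0 ≤ loc then iscanB xs loc f (i + 1) else i)
    else i

-- `while i < n: count += 1; j := jscan …; i := iscan …`  (fuel only makes the loop total: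
-- i strictly increases each iteration, so length + 1 units never run out)
def outerB (xs : List Int) (k : Int) : Nat → Nat → Int → Int
  | 0, _, count => count
  | f + 1, i, count =>
    if i < xs.length then
      outerB xs k f
        (iscanB xs (xs.getD (jscanB xs (xs.getD i 0 + k) xs.length i) 0 + k) xs.length
          (jscanB xs (xs.getD i 0 + k) xs.length i + 1))
        (count + 1)
    else count

def hackerlandRadioTransmitters_alt (x : List Int) (k : Int) : Int :=
  -- x.sort(); then the outer while over the sorted list
  outerB (PySem.List.sorted x (fun y => y) false) k
    ((PySem.List.sorted x (fun y => y) false).length + 1) 0 0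

-- ===== PRECONDITION & SPEC =====
-- Pre_ excludes only the empty list, on which A raises IndexError at x[0].
def Pre_hackerlandRadioTransmitters (x : List Int) (_k : Int) : Prop := x ≠ []
instance (x : List Int) (k : Int) : Decidable (Pre_hackerlandRadioTransmitters x k) := by unfold Pre_hackerlandRadioTransmitters; infer_instance

def pvWitness_hackerlandRadioTransmitters : List Int × Int := ([1, 5, 2], 2)

-- For negative range k A returns len(x)+1 (its seed state makes the first house open a
-- second group on top of the initial count of 1); B returns len(x), the intended greedy
-- count, since the answer can never exceed the number of houses.
def D_hackerlandRadioTransmitters (_x : List Int) (k : Int) : Prop := k < 0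
instance (x : List Int) (k : Int) : Decidable (D_hackerlandRadioTransmitters x k) := by unfold D_hackerlandRadioTransmitters; infer_instance

def Spec_hackerlandRadioTransmitters (x : List Int) (k : Int) (out : Int) : Prop := ¬ D_hackerlandRadioTransmitters x k → out = hackerlandRadioTransmitters_alt x k
instance (x : List Int) (k : Int) (out : Int) : Decidable (Spec_hackerlandRadioTransmitters x k out) := by unfold Spec_hackerlandRadioTransmitters; infer_instance

def pvDiffWitness_hackerlandRadioTransmitters : List Int × Int := ([0], -1)
def pvDiffWitnessOut_hackerlandRadioTransmitters : Int × Int := (2, 1)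

-- ===== CLAIM (what is proved, stated in full; the proofs are below) =====
def Claim_unchanged_hackerlandRadioTransmitters : Prop := ∀ (x : List Int) (k : Int), Dom_hackerlandRadioTransmitters x k → Pre_hackerlandRadioTransmitters x k → Spec_hackerlandRadioTransmitters x k (hackerlandRadioTransmitters x k)
def Claim_changed_hackerlandRadioTransmitters : Prop := Dom_hackerlandRadioTransmitters (pvDiffWitness_hackerlandRadioTransmitters.1) (pvDiffWitness_hackerlandRadioTransmitters.2) ∧ Pre_hackerlandRadioTransmitters (pvDiffWitness_hackerlandRadioTransmitters.1) (pvDiffWitness_hackerlandRadioTransmitters.2) ∧ D_hackerlandRadioTransmitters (pvDiffWitness_hackerlandRadioTransmitters.1) (pvDiffWitness_hackerlandRadioTransmitters.2) ∧ hackerlandRadioTransmitters (pvDiffWitness_hackerlandRadioTransmitters.1) (pvDiffWitness_hackerlandRadioTransmitters.2) = pvDiffWitnessOut_hackerlandRadioTransmitters.1 ∧ hackerlandRadioTransmitters_alt (pvDiffWitness_hackerlandRadioTransmitters.1) (pvDiffWitness_hackerlandRadioTransmitters.2) = pvDiffWitnessOut_hackerlandRadioTransmitters.2 ∧ pvDiffWitnessOut_hackerlandRadioTransmitters.1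 ≠ pvDiffWitnessOut_hackerlandRadioTransmitters.2
def Claim_exact_hackerlandRadioTransmitters : Prop := ∀ (x : List Int) (k : Int), Dom_hackerlandRadioTransmitters x k → Pre_hackerlandRadioTransmitters x k → D_hackerlandRadioTransmitters x k → hackerlandRadioTransmitters x k ≠ hackerlandRadioTransmitters_alt x k

-- ===== LEMMAS AND PROOFS =====

-- the last element of the initial ≤-run below loc, default d (A's final `en` of a group)
def lastLe (loc d : Int) : List Int → Int
  | [] => d
  | h :: t => if h ≤ loc then lastLe loc h t else d

-- reference group count on a sorted list
def gRef (k : Int) : List Int → Int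
  | [] => 0
  | h :: t => 1 + gRef k (t.dropWhile (fun y => decide (y ≤ lastLe (h + k) h t + k)))
termination_by l => l.length
decreasing_by
  simp only [List.length_cons]
  exact Nat.lt_succ_of_le (List.length_dropWhile_le _ _)

theorem gRef_cons (k h : Int) (t : List Int) :
    gRef k (h :: t)
      = 1 + gRef k (t.dropWhile (fun y => decide (y ≤ lastLe (h + k) h t + k))) := by
  simp only [gRef]

theorem lastLe_ge (t : List Int) (loc d : Int) (hs : t.Pairwise (· ≤ ·))
    (hd : ∀ y ∈ t, d ≤ y) : d ≤ lastLe loc d t := by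
  induction t generalizing d with
  | nil => exact le_refl d
  | cons h t ih =>
    simp only [lastLe]
    split
    · exact le_trans (hd h List.mem_cons_self)
        (ih h (List.pairwise_cons.mp hs).2 (fun y hy => (List.pairwise_cons.mp hs).1 y hy))
    · exact le_refl d

theorem lastLe_head_gt (t : List Int) (loc d : Int)
    (h : ∀ y ∈ t.head?, ¬ y ≤ loc) : lastLe loc d t = d := by
  cases t with
  | nil => rfl
  | cons a t => simp only [lastLe, if_neg (h a rfl)]

theorem lastLe_eq_getLastD (t : List Int) (loc d : Int) :
    lastLe loc d t = (t.takeWhile (fun y => decide (y ≤ loc))).getLastD d := by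
  induction t generalizing d with
  | nil => rfl
  | cons h t ih =>
    by_cases hh : h ≤ loc
    · rw [lastLe, if_pos hh, List.takeWhile_cons, if_pos (by simpa using hh),
        List.getLastD_cons, ih]
    · rw [lastLe, if_neg hh, List.takeWhile_cons, if_neg (by simpa using hh)]
      rfl

theorem getD_cons_takeWhile (h : Int) (t : List Int) (p : Int → Bool) :
    (h :: t).getD ((t.takeWhile p).length) 0 = (t.takeWhile p).getLastD h := by
  induction t generalizing h with
  | nil => simp
  | cons y t ih =>
    by_cases hp : p y = true
    · rw [List.takeWhile_cons, if_pos hp, List.length_cons, List.getD_cons_succ,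
        List.getLastD_cons]
      exact ih y
    · rw [List.takeWhile_cons, if_neg hp]
      simp

theorem dropWhile_drop_takeWhile (t : List Int) (p q : Int → Bool)
    (hpq : ∀ y, p y = true → q y = true) :
    t.dropWhile q = (t.drop (t.takeWhile p).length).dropWhile q := by
  induction t with
  | nil => simp
  | cons y t ih =>
    by_cases hp : p y = true
    · rw [List.takeWhile_cons, if_pos hp, List.dropWhile_cons, if_pos (hpq y hp),
        List.length_cons, List.drop_succ_cons]
      exact ih
    · rw [List.takeWhile_cons, if_neg hp]
      simp

theorem dropWhile_eq_drop_takeWhile (t : List Int) (q : Int → Bool) :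
    t.dropWhile q = t.drop (t.takeWhile q).length := by
  induction t with
  | nil => rfl
  | cons y t ih =>
    by_cases hq : q y = true
    · rw [List.dropWhile_cons, if_pos hq, List.takeWhile_cons, if_pos hq,
        List.length_cons, List.drop_succ_cons, ih]
    · rw [List.dropWhile_cons, if_neg hq, List.takeWhile_cons, if_neg hq]
      rfl

theorem jscanB_eq (xs : List Int) (loc : Int) (f j : Nat) (hf : xs.length - (j + 1) ≤ f) :
    jscanB xs loc f j
      = j + ((xs.drop (j + 1)).takeWhile (fun y => decide (y ≤ loc))).length := by
  induction f generalizing j with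
  | zero =>
    rw [List.drop_eq_nil_of_le (by omega)]
    simp [jscanB]
  | succ f ih =>
    by_cases h1 : j + 1 < xs.length
    · have hdrop := List.getElem_cons_drop h1
      have hg : xs.getD (j + 1) 0 = xs[j + 1] := List.getD_eq_getElem _ _ h1
      by_cases h2 : xs.getD (j + 1) 0 ≤ loc
      · rw [show jscanB xs loc (f + 1) j = jscanB xs loc f (j + 1) from by
          simp only [jscanB]; rw [if_pos h1, if_pos h2]]
        rw [ih (j + 1) (by omega), ← hdrop, List.takeWhile_cons,
          if_pos (by rw [hg] at h2; simpa using h2), List.length_cons]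
        omega
      · rw [show jscanB xs loc (f + 1) j = j from by
          simp only [jscanB]; rw [if_pos h1, if_neg h2]]
        rw [← hdrop, List.takeWhile_cons, if_neg (by rw [hg] at h2; simpa using h2)]
        simp
    · rw [show jscanB xs loc (f + 1) j = j from by simp only [jscanB]; rw [if_neg h1]]
      rw [List.drop_eq_nil_of_le (by omega)]
      simp

theorem iscanB_eq (xs : List Int) (loc : Int) (f i : Nat) (hf : xs.length - i ≤ f) :
    iscanB xs loc f i
      = i + ((xs.drop i).takeWhile (fun y => decide (y ≤ loc))).length := by
  induction f generalizing i with
  | zero =>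
    rw [List.drop_eq_nil_of_le (by omega)]
    simp [iscanB]
  | succ f ih =>
    by_cases h1 : i < xs.length
    · have hdrop := List.getElem_cons_drop h1
      have hg : xs.getD i 0 = xs[i] := List.getD_eq_getElem _ _ h1
      by_cases h2 : xs.getD i 0 ≤ loc
      · rw [show iscanB xs loc (f + 1) i = iscanB xs loc f (i + 1) from by
          simp only [iscanB]; rw [if_pos h1, if_pos h2]]
        rw [ih (i + 1) (by omega), ← hdrop, List.takeWhile_cons,
          if_pos (by rw [hg] at h2; simpa using h2), List.length_cons]
        omega
      · rw [show iscanB xs loc (f + 1) i = i from by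
          simp only [iscanB]; rw [if_pos h1, if_neg h2]]
        rw [← hdrop, List.takeWhile_cons, if_neg (by rw [hg] at h2; simpa using h2)]
        simp
    · rw [show iscanB xs loc (f + 1) i = i from by simp only [iscanB]; rw [if_neg h1]]
      rw [List.drop_eq_nil_of_le (by omega)]
      simp

theorem loopA_eq (k : Int) (_hk : 0 ≤ k) (t : List Int) (st en tx : Int)
    (hs : t.Pairwise (· ≤ ·)) (hen : ∀ y ∈ t, en ≤ y) (h1 : st ≤ en) (h2 : en ≤ st + k) :
    loopA k st en tx t =
      tx + gRef k (t.dropWhile (fun y => decide (y ≤ lastLe (st + k) en t + k))) := by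
  induction t generalizing st en tx with
  | nil => simp [loopA, gRef, lastLe]
  | cons h t ih =>
    have hh : en ≤ h := hen h List.mem_cons_self
    have hts : t.Pairwise (· ≤ ·) := (List.pairwise_cons.mp hs).2
    have hht : ∀ y ∈ t, h ≤ y := (List.pairwise_cons.mp hs).1
    by_cases hb1 : h > en + k
    · rw [loopA, if_pos hb1]
      have hst : ¬ h ≤ st + k := by omega
      rw [show lastLe (st + k) en (h :: t) = en from by rw [lastLe, if_neg hst]]
      rw [List.dropWhile_cons, if_neg (by simp; omega)]
      rw [ih h h (tx + 1) hts hht (le_refl h) (by omega)]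
      rw [gRef_cons]
      omega
    · by_cases hb2 : h ≤ st + k
      · rw [loopA, if_neg hb1, if_pos hb2]
        rw [show lastLe (st + k) en (h :: t) = lastLe (st + k) h t from by
          rw [lastLe, if_pos hb2]]
        have hm : h ≤ lastLe (st + k) h t := lastLe_ge t _ h hts hht
        rw [List.dropWhile_cons, if_pos (by simp; omega)]
        exact ih st h tx hts hht (by omega) hb2
      · rw [loopA, if_neg hb1, if_neg hb2]
        rw [show lastLe (st + k) en (h :: t) = en from by rw [lastLe, if_neg hb2]]
        rw [List.dropWhile_cons, if_pos (by simp; omega)]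
        rw [ih st en tx hts (fun y hy => le_trans hh (hht y hy)) h1 h2]
        rw [lastLe_head_gt t (st + k) en (fun y hy => by
          have : h ≤ y := hht y (List.mem_of_mem_head? hy)
          omega)]

theorem outerB_eq (xs : List Int) (k : Int) (hs : xs.Pairwise (· ≤ ·)) (f i : Nat)
    (count : Int) (hf : xs.length - i < f) :
    outerB xs k f i count = count + gRef k (xs.drop i) := by
  induction f generalizing i count with
  | zero => omega
  | succ f ih =>
    by_cases hlt : i < xs.length
    · have hdropi := List.getElem_cons_drop hlt
      have hgi : xs.getD i 0 = xs[i] := List.getD_eq_getElem _ _ hlt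
      have hsdrop : (xs[i] :: xs.drop (i + 1)).Pairwise (· ≤ ·) := by
        rw [hdropi]; exact List.Pairwise.sublist (List.drop_sublist _ _) hs
      have hht : ∀ y ∈ xs.drop (i + 1), xs[i] ≤ y := (List.pairwise_cons.mp hsdrop).1
      have hts : (xs.drop (i + 1)).Pairwise (· ≤ ·) := (List.pairwise_cons.mp hsdrop).2
      have htlen : (xs.drop (i + 1)).length = xs.length - (i + 1) := List.length_drop
      -- the first inner while: j = i + a
      have hj := jscanB_eq xs (xs.getD i 0 + k) xs.length i (by omega)
      have hale :
          ((xs.drop (i + 1)).takeWhile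
            (fun y => decide (y ≤ xs.getD i 0 + k))).length ≤ xs.length - (i + 1) := by
        rw [← htlen]
        exact (List.takeWhile_sublist _).length_le
      -- name the jump length
      generalize ha :
        ((xs.drop (i + 1)).takeWhile (fun y => decide (y ≤ xs.getD i 0 + k))).length = a
        at hj hale
      -- the transmitter house: xs[i + a] = lastLe (xs[i] + k) xs[i] (drop (i+1))
      have hm : xs.getD (i + a) 0 = lastLe (xs[i] + k) xs[i] (xs.drop (i + 1)) := by
        have h1 : xs.getD (i + a) 0 = (xs.drop i).getD a 0 := by
          rw [List.getD_eq_getElem?_getD, List.getD_eq_getElem?_getD, List.getElem?_drop]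
        rw [h1, ← hdropi, ← ha, hgi, getD_cons_takeWhile, lastLe_eq_getLastD]
      -- the second inner while: i' = (i + a + 1) + b
      have hi' := iscanB_eq xs (xs.getD (i + a) 0 + k) xs.length (i + a + 1) (by omega)
      have hble :
          ((xs.drop (i + a + 1)).takeWhile
            (fun y => decide (y ≤ xs.getD (i + a) 0 + k))).length
            ≤ (xs.drop (i + a + 1)).length :=
        (List.takeWhile_sublist _).length_le
      generalize hb :
        ((xs.drop (i + a + 1)).takeWhile
          (fun y => decide (y ≤ xs.getD (i + a) 0 + k))).length = b at hi' hble
      have hblen : (xs.drop (i + a + 1)).length = xs.length - (i + a + 1) :=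
        List.length_drop
      -- one unfolding of the outer while
      rw [show outerB xs k (f + 1) i count
          = outerB xs k f
              (iscanB xs (xs.getD (jscanB xs (xs.getD i 0 + k) xs.length i) 0 + k)
                xs.length (jscanB xs (xs.getD i 0 + k) xs.length i + 1)) (count + 1) from by
        simp [outerB, hlt]]
      rw [hj, hi']
      rw [ih (i + a + 1 + b) (count + 1) (by omega)]
      -- identify the remainder with gRef's recursive argument
      have hmge : xs[i] ≤ lastLe (xs[i] + k) xs[i] (xs.drop (i + 1)) :=
        lastLe_ge _ _ _ hts hht
      have hrest : xs.drop (i + a + 1 + b)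
          = (xs.drop (i + 1)).dropWhile
              (fun y => decide (y ≤ lastLe (xs[i] + k) xs[i] (xs.drop (i + 1)) + k)) := by
        rw [dropWhile_drop_takeWhile (xs.drop (i + 1))
            (fun y => decide (y ≤ xs.getD i 0 + k))
            (fun y => decide (y ≤ lastLe (xs[i] + k) xs[i] (xs.drop (i + 1)) + k))
            (fun y hy => by
              rw [hgi] at hy
              simp only [decide_eq_true_eq] at *
              omega)]
        rw [ha, dropWhile_eq_drop_takeWhile]
        have harg : (xs.drop (i + 1)).drop a = xs.drop (i + a + 1) := by
          rw [List.drop_drop]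
          congr 1
          omega
        rw [harg, ← hm, hb, List.drop_drop]
      -- unfold gRef once on the right
      rw [hrest]
      conv_rhs => rw [← hdropi, gRef_cons]
      omega
    · rw [show outerB xs k (f + 1) i count = count from by simp [outerB, hlt]]
      rw [List.drop_eq_nil_of_le (by omega)]
      simp [gRef]

theorem sorted_pairwise_le (x : List Int) :
    (PySem.List.sorted x (fun y => y) false).Pairwise (· ≤ ·) := by
  simpa using PySem.List.sorted_pairwise x (fun y => y)

theorem hackA_eq_gRef (x : List Int) (k : Int) (hk : 0 ≤ k) (hx : x ≠ []) :
    hackerlandRadioTransmitters x k = gRef k (PySem.List.sorted x (fun y => y) false) := by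
  have hxs : PySem.List.sorted x (fun y => y) false ≠ [] := by
    rw [Ne, PySem.List.sorted_eq_nil_iff]
    exact hx
  obtain ⟨x0, t, hE⟩ : ∃ x0 t, PySem.List.sorted x (fun y => y) false = x0 :: t := by
    cases hc : PySem.List.sorted x (fun y => y) false with
    | nil => exact absurd hc hxs
    | cons a b => exact ⟨a, b, rfl⟩
  have hp := sorted_pairwise_le x
  rw [hE] at hp
  unfold hackerlandRadioTransmitters
  rw [hE, PySem.List.pyGet?_zero_cons]
  show loopA k x0 x0 1 (x0 :: t) = _
  rw [loopA, if_neg (by omega), if_pos (by omega)]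
  rw [loopA_eq k hk t x0 x0 1 (List.pairwise_cons.mp hp).2 (List.pairwise_cons.mp hp).1
    (le_refl x0) (by omega)]
  rw [gRef_cons]

theorem hackB_eq_gRef (x : List Int) (k : Int) :
    hackerlandRadioTransmitters_alt x k
      = gRef k (PySem.List.sorted x (fun y => y) false) := by
  unfold hackerlandRadioTransmitters_alt
  rw [outerB_eq _ k (sorted_pairwise_le x) _ 0 0 (by omega)]
  simp

theorem gRef_neg (k : Int) (hk : k < 0) (l : List Int) (hs : l.Pairwise (· ≤ ·)) :
    gRef k l = l.length := by
  induction l with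
  | nil => simp [gRef]
  | cons h t ih =>
    have hht : ∀ y ∈ t, h ≤ y := (List.pairwise_cons.mp hs).1
    have hm : lastLe (h + k) h t = h :=
      lastLe_head_gt t (h + k) h (fun y hy => by
        have : h ≤ y := hht y (List.mem_of_mem_head? hy)
        omega)
    have hdw : t.dropWhile (fun y => decide (y ≤ lastLe (h + k) h t + k)) = t := by
      rw [hm]
      cases t with
      | nil => rfl
      | cons y t' =>
        rw [List.dropWhile_cons, if_neg (by
          have : h ≤ y := hht y List.mem_cons_self
          simp only [decide_eq_true_eq]
          omega)]
    rw [gRef_cons, hdw, ih (List.pairwise_cons.mp hs).2]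
    simp
    omega

theorem loopA_neg (k : Int) (hk : k < 0) (t : List Int) (st en tx : Int)
    (hs : t.Pairwise (· ≤ ·)) (hen : ∀ y ∈ t, en ≤ y) :
    loopA k st en tx t = tx + t.length := by
  induction t generalizing st en tx with
  | nil => simp [loopA]
  | cons h t ih =>
    have hh : en ≤ h := hen h List.mem_cons_self
    rw [loopA, if_pos (by omega)]
    rw [ih h h (tx + 1) (List.pairwise_cons.mp hs).2 (List.pairwise_cons.mp hs).1]
    simp
    omega

theorem hackA_neg (x : List Int) (k : Int) (hk : k < 0) (hx : x ≠ []) :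
    hackerlandRadioTransmitters x k = 1 + x.length := by
  have hxs : PySem.List.sorted x (fun y => y) false ≠ [] := by
    rw [Ne, PySem.List.sorted_eq_nil_iff]
    exact hx
  obtain ⟨x0, t, hE⟩ : ∃ x0 t, PySem.List.sorted x (fun y => y) false = x0 :: t := by
    cases hc : PySem.List.sorted x (fun y => y) false with
    | nil => exact absurd hc hxs
    | cons a b => exact ⟨a, b, rfl⟩
  have hp := sorted_pairwise_le x
  rw [hE] at hp
  have hlen : (x0 :: t).length = x.length := by
    rw [← hE, PySem.List.length_sorted]
  unfold hackerlandRadioTransmitters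
  rw [hE, PySem.List.pyGet?_zero_cons]
  show loopA k x0 x0 1 (x0 :: t) = _
  rw [loopA_neg k hk (x0 :: t) x0 x0 1 hp (fun y hy => by
    rcases List.mem_cons.mp hy with h | h
    · omega
    · exact (List.pairwise_cons.mp hp).1 y h)]
  rw [hlen]

-- ===== VERDICT (by name: the statement is the Claim_ definition above) =====
theorem hackerlandRadioTransmitters_spec : Claim_unchanged_hackerlandRadioTransmitters := by
  intro x k _hd hpre hnd
  have hk : 0 ≤ k := by
    unfold D_hackerlandRadioTransmitters at hnd
    omega
  rw [hackA_eq_gRef x k hk hpre, hackB_eq_gRef]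

theorem hackerlandRadioTransmitters_changed : Claim_changed_hackerlandRadioTransmitters := by
  unfold Claim_changed_hackerlandRadioTransmitters
  decide

theorem hackerlandRadioTransmitters_tight : Claim_exact_hackerlandRadioTransmitters := by
  intro x k _hd hpre hd
  unfold D_hackerlandRadioTransmitters at hd
  rw [hackA_neg x k hd hpre, hackB_eq_gRef,
    gRef_neg k hd _ (sorted_pairwise_le x), PySem.List.length_sorted]
  omega
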